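-- pv_equiv track=rewrite | github.com/monishamanchem/Minu-JavaScript-Compiler | code.py | generate_assembly_code
-- ===== SOURCE A (Python) =====
-- def generate_assembly_code(resulting_intermediate_code):
--     assembly_code_data = """.data
-- x:  .word 0
-- y:  .word 0
-- z:  .word 5
--
-- adult_msg: .asciiz "You are an adult.\n"
-- minor_msg: .asciiz "You are a minor.\n"
-- """
--
--     assembly_code_text = """.text
-- .globl _start
--
-- _start:
-- """
--
--     label_count = 1
--
--     lines = resulting_intermediate_code.split('\n')
--     for line in lines:
--         if 'var' in line or 'let' in line or 'const' in line:
--             var_name = line.split()[1][:-1]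
--             assembly_code_data += f"{var_name}: .word 0\n"
--
--         elif '=' in line and 'IF' not in line and 'PRINT' not in line:
--             var_name, value = line.split('=')
--             var_name = var_name.strip()
--             value = value.strip()
--             assembly_code_text += f"    li $t{label_count}, {value}\n"
--             assembly_code_text += f"    sw $t{label_count}, {var_name}\n"
--             label_count += 1
--
--         elif 'IF' in line:
--             condition = line.split('IF ')[1].split(' GOTO')[0].strip()
--             label = line.split('GOTO ')[1].strip()
--             assembly_code_text += f"    bge $t{label_count - 1}, {condition}, {label}\n"
--
--         elif 'PRINT' in line:
--             message = line.split('"')[1]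
--             assembly_code_text += f"    li $v0, 4\n"
--             assembly_code_text += f"    la $a0, {message}_msg\n"
--             assembly_code_text += f"    syscall\n"
--
--         elif 'GOTO' in line:
--             label = line.split('GOTO ')[1].strip()
--             assembly_code_text += f"    j {label}\n"
--             assembly_code_text += f"{label}:\n"
--
--     assembly_code_text += """
-- end_program:
--     li $v0, 10
--     syscall
-- """
--
--     return assembly_code_data + assembly_code_text
-- ===== SOURCE B (Python) =====
-- def generate_assembly_code(resulting_intermediate_code):
--     DATA_HEADER = """.data
-- x:  .word 0
-- y:  .word 0
-- z:  .word 5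
--
-- adult_msg: .asciiz "You are an adult.\n"
-- minor_msg: .asciiz "You are a minor.\n"
-- """
--
--     TEXT_HEADER = """.text
-- .globl _start
--
-- _start:
-- """
--
--     FOOTER = """
-- end_program:
--     li $v0, 10
--     syscall
-- """
--
--     def kind(line):
--         if 'var' in line or 'let' in line or 'const' in line:
--             return 'decl'
--         if '=' in line and 'IF' not in line and 'PRINT' not in line:
--             return 'assign'
--         if 'IF' in line:
--             return 'if'
--         if 'PRINT' in line:
--             return 'print'
--         if 'GOTO' in line:
--             return 'goto'
--         return 'skip'
--
--     def text_piece(line, k, c):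
--         if k == 'assign':
--             var_name, value = line.split('=')
--             return f"    li $t{c + 1}, {value.strip()}\n    sw $t{c + 1}, {var_name.strip()}\n"
--         if k == 'if':
--             condition = line.split('IF ')[1].split(' GOTO')[0].strip()
--             label = line.split('GOTO ')[1].strip()
--             return f"    bge $t{c}, {condition}, {label}\n"
--         if k == 'print':
--             message = line.split('"')[1]
--             return f"    li $v0, 4\n    la $a0, {message}_msg\n    syscall\n"
--         if k == 'goto':
--             label = line.split('GOTO ')[1].strip()
--             return f"    j {label}\n{label}:\n"
--         return ''
--
--     lines = resulting_intermediate_code.split('\n')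
--     kinds = [kind(line) for line in lines]
--
--     data_parts = [f"{line.split()[1][:-1]}: .word 0\n"
--                   for line, k in zip(lines, kinds) if k == 'decl']
--
--     counts = []
--     c = 0
--     for k in kinds:
--         counts.append(c)
--         if k == 'assign':
--             c += 1
--
--     text_parts = [text_piece(line, k, n)
--                   for line, k, n in zip(lines, kinds, counts)]
--
--     return DATA_HEADER + ''.join(data_parts) + TEXT_HEADER + ''.join(text_parts) + FOOTER
-- ===== Notes on version B (the rewrite author's own statement) =====
-- stated objective: alternative
-- what changed: A's single stateful loop accumulating two strings and a mutable label counter is replaced by a stateless per-line translation: classify every line once, emit the .data section by filter+map, precompute each line's register index as a prefix count of assignment lines, and join the independently generated per-line .text pieces.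
import Mathlib
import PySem

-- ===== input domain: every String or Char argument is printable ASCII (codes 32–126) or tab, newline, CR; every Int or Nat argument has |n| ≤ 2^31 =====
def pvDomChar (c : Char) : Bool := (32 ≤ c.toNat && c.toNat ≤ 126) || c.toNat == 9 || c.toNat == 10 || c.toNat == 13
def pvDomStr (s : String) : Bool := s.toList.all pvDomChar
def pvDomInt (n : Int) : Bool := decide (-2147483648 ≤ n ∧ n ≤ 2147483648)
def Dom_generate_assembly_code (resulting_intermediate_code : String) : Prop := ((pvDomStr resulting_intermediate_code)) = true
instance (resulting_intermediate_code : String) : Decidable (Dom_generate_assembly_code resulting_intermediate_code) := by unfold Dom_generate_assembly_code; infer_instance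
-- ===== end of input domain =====

-- B replaces A's single stateful accumulation loop by a stateless per-line translation:
-- classify lines once, emit the .data declarations by filter+map, precompute each line's
-- register index by a prefix count of assignments, and join the per-line .text pieces
-- (objective: alternative decomposition, same cost; return value only).


-- ===== PORT A =====
-- the three fixed string blocks of the Python (shared literals; B's Python has the same three constants)
def gaHdrData : List Char := (".data\nx:  .word 0\ny:  .word 0\nz:  .word 5\n\nadult_msg: .asciiz \"You are an adult.\n\"\nminor_msg: .asciiz \"You are a minor.\n\"\n").toList
def gaHdrText : List Char := (".text\n.globl _start\n\n_start:\n").toList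
def gaFooter : List Char := ("\nend_program:\n    li $v0, 10\n    syscall\n").toList

-- one iteration of A's for-loop; state = ((assembly_code_data, assembly_code_text), label_count).
-- The raising index/unpack operations ([1] after split, the 2-tuple unpack of split('='))
-- are `getD []`-guarded; Pre_ excludes exactly the inputs where Python raises there.
def gaStepA (st : (List Char × List Char) × Int) (line : List Char) : (List Char × List Char) × Int :=
  if PySem.Chars.isIn "var".toList line || PySem.Chars.isIn "let".toList line
      || PySem.Chars.isIn "const".toList line then
    let tok := ((PySem.Chars.split₀ line)[1]?).getD []
    ((st.1.1 ++ PySem.List.slice tok none (some (-1)) ++ ": .word 0\n".toList, st.1.2), st.2)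
  else if PySem.Chars.isIn "=".toList line && !PySem.Chars.isIn "IF".toList line
      && !PySem.Chars.isIn "PRINT".toList line then
    let parts := PySem.Chars.splitOn line "=".toList
    let varName := PySem.Chars.strip (parts[0]?.getD [])
    let value := PySem.Chars.strip (parts[1]?.getD [])
    ((st.1.1,
      st.1.2 ++ "    li $t".toList ++ (PySem.Int.toStr st.2).toList ++ ", ".toList ++ value ++ "\n".toList
        ++ "    sw $t".toList ++ (PySem.Int.toStr st.2).toList ++ ", ".toList ++ varName ++ "\n".toList),
     st.2 + 1)
  else if PySem.Chars.isIn "IF".toList line then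
    let cond := PySem.Chars.strip
      (((PySem.Chars.splitOn ((PySem.Chars.splitOn line "IF ".toList)[1]?.getD []) " GOTO".toList)[0]?).getD [])
    let lab := PySem.Chars.strip ((PySem.Chars.splitOn line "GOTO ".toList)[1]?.getD [])
    ((st.1.1,
      st.1.2 ++ "    bge $t".toList ++ (PySem.Int.toStr (st.2 - 1)).toList ++ ", ".toList ++ cond
        ++ ", ".toList ++ lab ++ "\n".toList),
     st.2)
  else if PySem.Chars.isIn "PRINT".toList line then
    let msg := ((PySem.Chars.splitOn line "\"".toList)[1]?).getD []
    ((st.1.1,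
      st.1.2 ++ "    li $v0, 4\n".toList ++ "    la $a0, ".toList ++ msg ++ "_msg\n".toList
        ++ "    syscall\n".toList),
     st.2)
  else if PySem.Chars.isIn "GOTO".toList line then
    let lab := PySem.Chars.strip ((PySem.Chars.splitOn line "GOTO ".toList)[1]?.getD [])
    ((st.1.1, st.1.2 ++ "    j ".toList ++ lab ++ "\n".toList ++ lab ++ ":\n".toList), st.2)
  else st

def generate_assembly_code (resulting_intermediate_code : String) : String :=
  let lines := PySem.Chars.splitOn resulting_intermediate_code.toList "\n".toList
  let r := lines.foldl gaStepA ((gaHdrData, gaHdrText), 1)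
  String.ofList (r.1.1 ++ (r.1.2 ++ gaFooter))

-- ===== PORT B =====
-- B's kind(line) classifier
def gbKind (line : List Char) : String :=
  if PySem.Chars.isIn "var".toList line || PySem.Chars.isIn "let".toList line
      || PySem.Chars.isIn "const".toList line then "decl"
  else if PySem.Chars.isIn "=".toList line && !PySem.Chars.isIn "IF".toList line
      && !PySem.Chars.isIn "PRINT".toList line then "assign"
  else if PySem.Chars.isIn "IF".toList line then "if"
  else if PySem.Chars.isIn "PRINT".toList line then "print"
  else if PySem.Chars.isIn "GOTO".toList line then "goto"
  else "skip"

-- B's data_parts element for a 'decl' line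
def gbDeclPiece (line : List Char) : List Char :=
  PySem.List.slice (((PySem.Chars.split₀ line)[1]?).getD []) none (some (-1)) ++ ": .word 0\n".toList

-- B's text_piece(line, k, c)
def gbTextPiece (line : List Char) (k : String) (c : Int) : List Char :=
  if k == "assign" then
    let parts := PySem.Chars.splitOn line "=".toList
    let varName := PySem.Chars.strip (parts[0]?.getD [])
    let value := PySem.Chars.strip (parts[1]?.getD [])
    "    li $t".toList ++ (PySem.Int.toStr (c + 1)).toList ++ ", ".toList ++ value ++ "\n".toList
      ++ "    sw $t".toList ++ (PySem.Int.toStr (c + 1)).toList ++ ", ".toList ++ varName ++ "\n".toList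
  else if k == "if" then
    let cond := PySem.Chars.strip
      (((PySem.Chars.splitOn ((PySem.Chars.splitOn line "IF ".toList)[1]?.getD []) " GOTO".toList)[0]?).getD [])
    let lab := PySem.Chars.strip ((PySem.Chars.splitOn line "GOTO ".toList)[1]?.getD [])
    "    bge $t".toList ++ (PySem.Int.toStr c).toList ++ ", ".toList ++ cond ++ ", ".toList ++ lab ++ "\n".toList
  else if k == "print" then
    let msg := ((PySem.Chars.splitOn line "\"".toList)[1]?).getD []
    "    li $v0, 4\n    la $a0, ".toList ++ msg ++ "_msg\n    syscall\n".toList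
  else if k == "goto" then
    let lab := PySem.Chars.strip ((PySem.Chars.splitOn line "GOTO ".toList)[1]?.getD [])
    "    j ".toList ++ lab ++ "\n".toList ++ lab ++ ":\n".toList
  else []

def generate_assembly_code_alt (resulting_intermediate_code : String) : String :=
  let lines := PySem.Chars.splitOn resulting_intermediate_code.toList "\n".toList
  let kinds := lines.map gbKind
  let dataParts := ((lines.zip kinds).filter (fun p => p.2 == "decl")).map (fun p => gbDeclPiece p.1)
  let counts := (kinds.foldl
      (fun (st : List Int × Int) k => (st.1 ++ [st.2], if k == "assign" then st.2 + 1 else st.2))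
      ([], 0)).1
  let textParts := ((lines.zip kinds).zip counts).map (fun p => gbTextPiece p.1.1 p.1.2 p.2)
  String.ofList (gaHdrData ++ dataParts.flatten ++ (gaHdrText ++ (textParts.flatten ++ gaFooter)))

-- ===== PRECONDITION & SPEC =====
-- exactly the lines on which A's fragile indexing raises: a declaration line with fewer than
-- two whitespace tokens (IndexError), an assignment line with more than one '=' (ValueError),
-- an IF line missing 'IF ' or 'GOTO ' (IndexError), a PRINT line without '"', a GOTO line
-- without 'GOTO ' — Pre_ is exactly "A returns normally".
def gaPreLine (line : List Char) : Bool :=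
  if PySem.Chars.isIn "var".toList line || PySem.Chars.isIn "let".toList line
      || PySem.Chars.isIn "const".toList line then
    2 ≤ (PySem.Chars.split₀ line).length
  else if PySem.Chars.isIn "=".toList line && !PySem.Chars.isIn "IF".toList line
      && !PySem.Chars.isIn "PRINT".toList line then
    PySem.Chars.count line "=".toList == 1
  else if PySem.Chars.isIn "IF".toList line then
    PySem.Chars.isIn "IF ".toList line && PySem.Chars.isIn "GOTO ".toList line
  else if PySem.Chars.isIn "PRINT".toList line then
    PySem.Chars.isIn "\"".toList line
  else if PySem.Chars.isIn "GOTO".toList line then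
    PySem.Chars.isIn "GOTO ".toList line
  else true

def Pre_generate_assembly_code (resulting_intermediate_code : String) : Prop :=
  ∀ line ∈ PySem.Chars.splitOn resulting_intermediate_code.toList "\n".toList, gaPreLine line = true
instance (resulting_intermediate_code : String) : Decidable (Pre_generate_assembly_code resulting_intermediate_code) := by unfold Pre_generate_assembly_code; infer_instance

def pvWitness_generate_assembly_code : String := "x = 5\nIF x GOTO L1\nGOTO end"

def Spec_generate_assembly_code (resulting_intermediate_code : String) (out : String) : Prop := out = generate_assembly_code_alt resulting_intermediate_code
instance (resulting_intermediate_code : String) (out : String) : Decidable (Spec_generate_assembly_code resulting_intermediate_code out) := by unfold Spec_generate_assembly_code; infer_instance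

-- ===== CLAIM (what is proved, stated in full; the proofs are below) =====
def Claim_equal_generate_assembly_code : Prop := ∀ (resulting_intermediate_code : String), Dom_generate_assembly_code resulting_intermediate_code → Pre_generate_assembly_code resulting_intermediate_code → Spec_generate_assembly_code resulting_intermediate_code (generate_assembly_code resulting_intermediate_code)

-- ===== LEMMAS AND PROOFS =====

-- the .data piece a line contributes (B's filter+map view of A's first branch)
def gaDP (line : List Char) : List Char := if gbKind line == "decl" then gbDeclPiece line else []

def gaInc (line : List Char) : Int := if gbKind line == "assign" then 1 else 0

-- the whole .text body from a starting assignment count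
def gaTP : List (List Char) → Int → List Char
  | [], _ => []
  | l :: ls, c => gbTextPiece l (gbKind l) c ++ gaTP ls (c + gaInc l)

-- B's counts loop, characterised
def gaCounts : List String → Int → List Int
  | [], _ => []
  | k :: ks, c => c :: gaCounts ks (c + (if k == "assign" then 1 else 0))

lemma gaStepA_eq (line d t : List Char) (c : Int) :
    gaStepA ((d, t), c + 1)  line
      = ((d ++ gaDP line, t ++ gbTextPiece line (gbKind line) c), (c + gaInc line) + 1) := by
  simp only [gaStepA, gaDP, gaInc, gbKind, gbDeclPiece, gbTextPiece]
  split_ifs <;> simp_all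

lemma gaFold_eq (L : List (List Char)) : ∀ (d t : List Char) (c : Int),
    L.foldl gaStepA ((d, t), c + 1)
      = ((d ++ (L.map gaDP).flatten, t ++ gaTP L c), (c + (L.map gaInc).sum) + 1) := by
  induction L with
  | nil => intro d t c; simp [gaTP]
  | cons l ls ih =>
    intro d t c
    rw [List.foldl_cons, gaStepA_eq, ih]
    simp [gaTP, List.append_assoc]
    ring

lemma gaCounts_loop (ks : List String) : ∀ (acc : List Int) (c : Int),
    (ks.foldl (fun (st : List Int × Int) k => (st.1 ++ [st.2], if k == "assign" then st.2 + 1 else st.2))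
      (acc, c)).1 = acc ++ gaCounts ks c := by
  induction ks with
  | nil => intro acc c; simp [gaCounts]
  | cons k ks ih =>
    intro acc c; rw [List.foldl_cons, ih]
    by_cases h : k = "assign" <;> simp [gaCounts, h]

lemma gaData_eq (L : List (List Char)) :
    ((((L.zip (L.map gbKind)).filter (fun p => p.2 == "decl")).map (fun p => gbDeclPiece p.1)).flatten)
      = (L.map gaDP).flatten := by
  induction L with
  | nil => simp
  | cons l ls ih =>
    simp only [List.map_cons, List.zip_cons_cons, List.filter_cons]
    by_cases h : gbKind l == "decl"
    · simp [h, gaDP, ih]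
    · simp [h, gaDP, ih]

lemma gaText_eq (L : List (List Char)) : ∀ (c : Int),
    ((((L.zip (L.map gbKind)).zip (gaCounts (L.map gbKind) c)).map
        (fun p => gbTextPiece p.1.1 p.1.2 p.2)).flatten)
      = gaTP L c := by
  induction L with
  | nil => intro c; simp [gaTP]
  | cons l ls ih =>
    intro c
    simp only [List.map_cons, List.zip_cons_cons, gaCounts, gaTP, List.map, List.flatten]
    rw [ih]
    simp [gaInc]

lemma gaFold_one (L : List (List Char)) (d t : List Char) :
    L.foldl gaStepA ((d, t), 1)
      = ((d ++ (L.map gaDP).flatten, t ++ gaTP L 0), (0 + (L.map gaInc).sum) + 1) := by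
  have h := gaFold_eq L d t 0
  norm_num at h ⊢
  exact h

-- ===== VERDICT (by name: the statement is the Claim_ definition above) =====
theorem generate_assembly_code_spec : Claim_equal_generate_assembly_code := by
  intro s _ _
  show generate_assembly_code s = generate_assembly_code_alt s
  unfold generate_assembly_code generate_assembly_code_alt
  simp only [gaFold_one, gaCounts_loop, List.nil_append, gaData_eq, gaText_eq]
  simp [List.append_assoc]
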